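-- pv_equiv track=rewrite | github.com/Red0psD3v4rsh007/Pentra | pentra_core/services/api-gateway/app/services/target_model_service.py | _dominant_origin
-- ===== SOURCE A (Python) =====
-- def _dominant_origin(origins: list[str]) -> str:
--     priority = ["observed", "finding_derived", "workflow_derived", "seeded_probe"]
--     normalized = [str(item).strip() for item in origins if str(item).strip()]
--     if not normalized:
--         return "observed"
--     for candidate in priority:
--         if candidate in normalized:
--             return candidate
--     return normalized[0]
-- ===== SOURCE B (Python) =====
-- def _dominant_origin(origins: list[str]) -> str:
--     priority = ["observed", "finding_derived", "workflow_derived", "seeded_probe"]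
--     rank = {p: i for i, p in enumerate(priority)}
--     normalized = [s for s in (str(item).strip() for item in origins) if s]
--     if not normalized:
--         return "observed"
--     best_rank = len(priority)
--     best_value = None
--     for s in normalized:
--         r = rank.get(s)
--         if r is not None and r < best_rank:
--             best_rank = r
--             best_value = s
--     return best_value if best_value is not None else normalized[0]
-- ===== Notes on version B (the rewrite author's own statement) =====
-- stated objective: alternative
-- what changed: Instead of scanning the data once per priority entry (for candidate in priority: if candidate in normalized), B builds a rank index over the priority list and makes one pass over normalized tracking the minimum-rank item.
import Mathlib
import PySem

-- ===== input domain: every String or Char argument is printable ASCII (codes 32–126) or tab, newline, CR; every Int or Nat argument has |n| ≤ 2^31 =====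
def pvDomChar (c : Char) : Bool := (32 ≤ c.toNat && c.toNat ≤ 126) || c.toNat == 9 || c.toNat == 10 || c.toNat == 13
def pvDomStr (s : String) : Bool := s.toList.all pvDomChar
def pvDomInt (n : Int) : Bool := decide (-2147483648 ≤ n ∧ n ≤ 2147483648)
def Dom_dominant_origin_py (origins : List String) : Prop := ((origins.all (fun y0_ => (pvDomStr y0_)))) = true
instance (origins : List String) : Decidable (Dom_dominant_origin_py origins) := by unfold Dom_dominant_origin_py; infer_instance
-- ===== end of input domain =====

-- B replaces A's per-priority scan of the data by one pass over the data tracking the minimum-rank item via a rank index (alternative decomposition, same results).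


-- ===== PORT A =====
def dominant_origin_py (origins : List String) : String :=
  let priority : List String := ["observed", "finding_derived", "workflow_derived", "seeded_probe"]
  let normalized := (origins.map (fun item => PySem.Str.strip item)).filter (fun s => s ≠ "")
  if normalized.isEmpty then "observed"
  else
    match priority.find? (fun c => normalized.contains c) with
    | some c => c
    | none => normalized.headD ""

-- ===== PORT B =====
def dominant_origin_py_alt (origins : List String) : String :=
  let priority : List String := ["observed", "finding_derived", "workflow_derived", "seeded_probe"]
  let rank : PySem.Dict String Int :=
    (PySem.List.enumerate priority 0).foldl (fun d iv => d.insert iv.2 iv.1) PySem.Dict.empty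
  let normalized := (origins.map (fun item => PySem.Str.strip item)).filter (fun s => s ≠ "")
  if normalized.isEmpty then "observed"
  else
    let st := normalized.foldl
      (fun (acc : Int × Option String) s =>
        match rank.get? s with
        | some r => if r < acc.1 then (r, some s) else acc
        | none => acc)
      ((4 : Int), none)
    match st.2 with
    | some v => v
    | none => normalized.headD ""

-- ===== PRECONDITION & SPEC =====
def Spec_dominant_origin_py (origins : List String) (out : String) : Prop := out = dominant_origin_py_alt origins
instance (origins : List String) (out : String) : Decidable (Spec_dominant_origin_py origins out) := by unfold Spec_dominant_origin_py; infer_instance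

-- ===== CLAIM (what is proved, stated in full; the proofs are below) =====
def Claim_equal_dominant_origin_py : Prop := ∀ (origins : List String), Dom_dominant_origin_py origins → Spec_dominant_origin_py origins (dominant_origin_py origins)

-- ===== LEMMAS AND PROOFS =====

-- rank (position in the priority list) of a string, 4 when absent
def pvRank (s : String) : Int :=
  if s = "observed" then 0 else if s = "finding_derived" then 1
  else if s = "workflow_derived" then 2 else if s = "seeded_probe" then 3 else 4

-- minimal rank present in a list (4 if none present)
def pvIdx (l : List String) : Int := l.foldr (fun s m => min (pvRank s) m) 4

-- the fold state of port B when the minimal rank seen so far is k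
def pvState (k : Int) : Int × Option String :=
  (k, if k = 0 then some "observed" else if k = 1 then some "finding_derived"
      else if k = 2 then some "workflow_derived" else if k = 3 then some "seeded_probe" else none)

-- port B's rank dictionary and fold function, named for the proofs (definitionally the port's terms)
def pvRankDict : PySem.Dict String Int :=
  (PySem.List.enumerate (["observed", "finding_derived", "workflow_derived", "seeded_probe"] : List String) 0).foldl
    (fun d iv => d.insert iv.2 iv.1) PySem.Dict.empty

def pvF (acc : Int × Option String) (s : String) : Int × Option String :=
  match pvRankDict.get? s with
  | some r => if r < acc.1 then (r, some s) else acc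
  | none => acc

lemma pvRank_bounds (s : String) : 0 ≤ pvRank s ∧ pvRank s ≤ 4 := by
  unfold pvRank; split_ifs <;> omega

lemma pvIdx_bounds (l : List String) : 0 ≤ pvIdx l ∧ pvIdx l ≤ 4 := by
  induction l with
  | nil => simp [pvIdx]
  | cons s t ih =>
    have := pvRank_bounds s
    simp only [pvIdx, List.foldr] at *
    omega

lemma pvIdx_cons (s : String) (t : List String) :
    pvIdx (s :: t) = min (pvRank s) (pvIdx t) := rfl

lemma pvRankDict_get (s : String) :
    pvRankDict.get? s = if pvRank s < 4 then some (pvRank s) else none := by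
  have hd : pvRankDict
      = PySem.Dict.mk [("observed",(0:Int)),("finding_derived",1),("workflow_derived",2),("seeded_probe",3)] := by
    decide
  rw [hd]
  by_cases h0 : s = "observed"
  · subst h0; decide
  by_cases h1 : s = "finding_derived"
  · subst h1; decide
  by_cases h2 : s = "workflow_derived"
  · subst h2; decide
  by_cases h3 : s = "seeded_probe"
  · subst h3; decide
  simp [pvRank, PySem.Dict.get?, List.find?, h0, h1, h2, h3,
    beq_eq_false_iff_ne.mpr (Ne.symm h0), beq_eq_false_iff_ne.mpr (Ne.symm h1),
    beq_eq_false_iff_ne.mpr (Ne.symm h2), beq_eq_false_iff_ne.mpr (Ne.symm h3)]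

lemma pvState_rank (s : String) (hr : pvRank s < 4) : pvState (pvRank s) = (pvRank s, some s) := by
  unfold pvRank at *
  split_ifs at * <;> simp_all [pvState]

lemma pvStep (k : Int) (s : String) (hk0 : 0 ≤ k) (hk4 : k ≤ 4) :
    pvF (pvState k) s = pvState (min k (pvRank s)) := by
  unfold pvF
  rw [pvRankDict_get]
  by_cases hr : pvRank s < 4
  · simp only [hr, if_pos]
    by_cases hlt : pvRank s < (pvState k).1
    · have hk : (pvState k).1 = k := rfl
      rw [if_pos hlt]
      rw [hk] at hlt
      have : min k (pvRank s) = pvRank s := by omega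
      rw [this, pvState_rank s hr]
    · have hk : (pvState k).1 = k := rfl
      rw [if_neg hlt]
      rw [hk] at hlt
      have : min k (pvRank s) = k := by omega
      rw [this]
  · have h4 : pvRank s = 4 := by have := pvRank_bounds s; omega
    simp only [hr, ite_false]
    have : min k (pvRank s) = k := by rw [h4]; omega
    rw [this]

lemma pvFold (l : List String) : ∀ k : Int, 0 ≤ k → k ≤ 4 →
    l.foldl pvF (pvState k) = pvState (min k (pvIdx l)) := by
  induction l with
  | nil =>
    intro k h0 h4
    have : min k (pvIdx []) = k := by simp [pvIdx]; omega
    simp [this]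
  | cons s t ih =>
    intro k h0 h4
    have hrb := pvRank_bounds s
    have hib := pvIdx_bounds t
    rw [List.foldl_cons, pvStep k s h0 h4, ih _ (by omega) (by omega), pvIdx_cons]
    congr 1
    omega

lemma pvRank_eq_zero {s : String} (h : pvRank s = 0) : s = "observed" := by
  unfold pvRank at h; split_ifs at h <;> simp_all
lemma pvRank_eq_one {s : String} (h : pvRank s = 1) : s = "finding_derived" := by
  unfold pvRank at h; split_ifs at h <;> simp_all
lemma pvRank_eq_two {s : String} (h : pvRank s = 2) : s = "workflow_derived" := by
  unfold pvRank at h; split_ifs at h <;> simp_all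
lemma pvRank_eq_three {s : String} (h : pvRank s = 3) : s = "seeded_probe" := by
  unfold pvRank at h; split_ifs at h <;> simp_all

lemma pvIdx_le_of_mem {l : List String} {s : String} (h : s ∈ l) : pvIdx l ≤ pvRank s := by
  induction l with
  | nil => cases h
  | cons a t ih =>
    rcases List.mem_cons.mp h with rfl | hm
    · rw [pvIdx_cons]; omega
    · rw [pvIdx_cons]; have := ih hm; omega

lemma pvIdx_attained {l : List String} (h : pvIdx l < 4) : ∃ s ∈ l, pvRank s = pvIdx l := by
  induction l with
  | nil => simp [pvIdx] at h
  | cons a t ih =>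
    rw [pvIdx_cons] at h ⊢
    by_cases hc : pvRank a ≤ pvIdx t
    · exact ⟨a, List.mem_cons_self, by omega⟩
    · have ht : pvIdx t < 4 := by omega
      obtain ⟨s, hs, hr⟩ := ih ht
      exact ⟨s, List.mem_cons_of_mem a hs, by omega⟩

lemma pvNotMem (l : List String) (j : Int) (h : pvIdx l = j) :
    (0 < j → "observed" ∉ l) ∧ (1 < j → "finding_derived" ∉ l) ∧
    (2 < j → "workflow_derived" ∉ l) ∧ (3 < j → "seeded_probe" ∉ l) := by
  refine ⟨fun hj hm => ?_, fun hj hm => ?_, fun hj hm => ?_, fun hj hm => ?_⟩ <;>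
    · have := pvIdx_le_of_mem hm
      simp [pvRank] at this
      omega

-- ===== VERDICT (by name: the statement is the Claim_ definition above) =====
theorem dominant_origin_py_spec : Claim_equal_dominant_origin_py := by
  intro origins _
  unfold Spec_dominant_origin_py dominant_origin_py dominant_origin_py_alt
  simp only []
  set l := (origins.map (fun item => PySem.Str.strip item)).filter (fun s => s ≠ "") with hl
  by_cases he : l.isEmpty
  · simp [he]
  · simp only [he, if_neg, Bool.false_eq_true, not_false_eq_true]
    have hfold : l.foldl pvF ((4 : Int), (none : Option String)) = pvState (pvIdx l) := by
      have h4 : ((4 : Int), (none : Option String)) = pvState 4 := rfl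
      rw [h4, pvFold l 4 (by omega) (by omega)]
      congr 1
      have := pvIdx_bounds l
      omega
    have hbounds := pvIdx_bounds l
    show (match List.find? (fun c => l.contains c) ["observed", "finding_derived", "workflow_derived", "seeded_probe"] with
        | some c => c | none => l.headD "") =
      (match (l.foldl pvF ((4 : Int), (none : Option String))).2 with | some v => v | none => l.headD "")
    rw [hfold]
    rcases show pvIdx l = 0 ∨ pvIdx l = 1 ∨ pvIdx l = 2 ∨ pvIdx l = 3 ∨ pvIdx l = 4 by omega with h|h|h|h|h
    · obtain ⟨s, hs, hr⟩ := pvIdx_attained (l := l) (by omega)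
      rw [h] at hr
      rw [pvRank_eq_zero hr] at hs
      simp [List.find?, hs, h, pvState]
    · obtain ⟨s, hs, hr⟩ := pvIdx_attained (l := l) (by omega)
      rw [h] at hr
      rw [pvRank_eq_one hr] at hs
      obtain ⟨n0, -, -, -⟩ := pvNotMem l _ h
      simp [List.find?, n0 (by omega), hs, h, pvState]
    · obtain ⟨s, hs, hr⟩ := pvIdx_attained (l := l) (by omega)
      rw [h] at hr
      rw [pvRank_eq_two hr] at hs
      obtain ⟨n0, n1, -, -⟩ := pvNotMem l _ h
      simp [List.find?, n0 (by omega), n1 (by omega), hs, h, pvState]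
    · obtain ⟨s, hs, hr⟩ := pvIdx_attained (l := l) (by omega)
      rw [h] at hr
      rw [pvRank_eq_three hr] at hs
      obtain ⟨n0, n1, n2, -⟩ := pvNotMem l _ h
      simp [List.find?, n0 (by omega), n1 (by omega), n2 (by omega), hs, h, pvState]
    · obtain ⟨n0, n1, n2, n3⟩ := pvNotMem l _ h
      simp [List.find?, n0 (by omega), n1 (by omega), n2 (by omega), n3 (by omega), h, pvState]
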